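-- pv_equiv track=rewrite | github.com/dekhaz/PythonScripts | my_py_sort.py | sort_this_list
-- ===== SOURCE A (Python) =====
-- def sort_this_list(working_list):
--     #this is a simple bubble sort.
--     #it is inefficient, comparing every member of the list to every other member
--     #one might say that it is the least efficient
--     #but it functions, so...
--     #step counter is incremented after every line of code in the sort
--     basic_step_counter = 0
--     for section in range(1,int(len(working_list))):
--         for current in range(1,int(len(working_list))):
--             basic_step_counter+=1
--             if (working_list[current-1] > working_list[current]):
--                 #store value of lower indexed value
--                 temp_int = working_list[current-1]
--                 basic_step_counter+=1
--                 #move upper indexed value into lower indexed spot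
--                 working_list[current-1] = working_list[current]
--                 basic_step_counter+=1
--                 #move stored value to upper indexed spot
--                 working_list[current] = temp_int
--                 basic_step_counter+=1
--     #print (working_list)
--     print ("step counter incremented " + str(basic_step_counter) + " times.")
--     return working_list
-- ===== SOURCE B (Python) =====
-- def sort_this_list(working_list):
--     # Idiomatic replacement: sort in place with the built-in Timsort and
--     # return the same (mutated) list, exactly as A does.  A's diagnostic
--     # print of its step counter is not reproduced (return value unchanged).
--     working_list.sort()
--     return working_list
-- ===== Notes on version B (the rewrite author's own statement) =====
-- stated objective: faster
-- what changed: Replaced the hand-written quadratic bubble sort (n-1 full passes with adjacent swaps and a step counter) by a single call to the built-in list.sort (Timsort); the diagnostic print of the step counter is dropped, the returned (and in-place sorted) list is identical.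
import Mathlib
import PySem

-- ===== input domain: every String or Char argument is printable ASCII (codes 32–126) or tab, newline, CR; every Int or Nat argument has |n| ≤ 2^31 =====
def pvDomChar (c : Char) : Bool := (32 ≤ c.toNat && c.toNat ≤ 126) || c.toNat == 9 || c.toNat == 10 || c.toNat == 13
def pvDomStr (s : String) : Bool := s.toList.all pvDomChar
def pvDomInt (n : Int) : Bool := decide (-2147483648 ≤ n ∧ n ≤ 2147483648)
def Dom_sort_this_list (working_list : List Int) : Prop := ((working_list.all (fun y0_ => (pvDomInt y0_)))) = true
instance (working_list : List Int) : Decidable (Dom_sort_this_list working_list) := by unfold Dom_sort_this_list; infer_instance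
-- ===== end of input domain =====

-- B replaces A's hand-written bubble sort by the built-in sort (Timsort), dropping A's
-- diagnostic print of its step counter; both sort the list in place and the equivalence
-- proved here is about the RETURN value (identical sorted list).

-- ===== PORT A =====
-- One step of the inner loop at index `current` (1 ≤ current < len, so all indices are
-- in range and Python's working_list[...] never raises; List.getD/List.set are exact here).
def pvInnerStep (l : List Int) (current : Nat) : List Int :=
  if l.getD (current - 1) 0 > l.getD current 0 then
    -- temp_int = working_list[current-1]
    let temp_int := l.getD (current - 1) 0
    -- working_list[current-1] = working_list[current]
    let l' := l.set (current - 1) (l.getD current 0)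
    -- working_list[current] = temp_int
    l'.set current temp_int
  else l

-- for section in range(1, len(working_list)): for current in range(1, len(working_list)): …
-- (range(1, n) = List.range' 1 (n-1); the step counter only feeds the print and is omitted)
def sort_this_list (working_list : List Int) : List Int :=
  (List.range' 1 (working_list.length - 1)).foldl
    (fun l _section => (List.range' 1 (l.length - 1)).foldl pvInnerStep l)
    working_list

-- ===== PORT B =====
-- working_list.sort(); return working_list
def sort_this_list_alt (working_list : List Int) : List Int :=
  PySem.List.sorted working_list (fun x => x) false

-- ===== PRECONDITION & SPEC =====
def Spec_sort_this_list (working_list : List Int) (out : List Int) : Prop := out = sort_this_list_alt working_list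
instance (working_list : List Int) (out : List Int) : Decidable (Spec_sort_this_list working_list out) := by unfold Spec_sort_this_list; infer_instance

-- ===== CLAIM (what is proved, stated in full; the proofs are below) =====
def Claim_equal_sort_this_list : Prop := ∀ (working_list : List Int), Dom_sort_this_list working_list → Spec_sort_this_list working_list (sort_this_list working_list)

-- ===== LEMMAS AND PROOFS =====

-- One full bubble pass, written structurally (proved equal to A's index-based inner fold).
def bubAux : List Int → List Int
  | a :: b :: t => if a > b then b :: bubAux (a :: t) else a :: bubAux (b :: t)
  | l => l
termination_by l => l.length

theorem bubAux_cons2 (a b : Int) (t : List Int) :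
    bubAux (a :: b :: t) = if a > b then b :: bubAux (a :: t) else a :: bubAux (b :: t) := by
  rw [bubAux]

theorem getD_append_len (pre t : List Int) (a : Int) :
    (pre ++ a :: t).getD pre.length 0 = a := by
  simp [List.getD]

theorem set_append_len (pre t : List Int) (a v : Int) :
    (pre ++ a :: t).set pre.length v = pre ++ v :: t := by
  simp

-- A's inner fold, started after a fixed prefix, is `bubAux` on the suffix.
theorem pass_eq_aux (t pre : List Int) :
    (List.range' (pre.length + 1) (t.length - 1)).foldl pvInnerStep (pre ++ t)
      = pre ++ bubAux t := by
  match t with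
  | [] => simp [bubAux]
  | [a] => simp [bubAux]
  | a :: b :: t' =>
    have hlen : (a :: b :: t').length - 1 = t'.length + 1 := by simp
    rw [hlen, List.range'_succ, List.foldl_cons, bubAux_cons2]
    have h1 : (pre ++ a :: b :: t').getD pre.length 0 = a := getD_append_len pre (b :: t') a
    have h2 : (pre ++ a :: b :: t').getD (pre.length + 1) 0 = b := by
      simp
    have e1 : (pre ++ a :: b :: t').set pre.length b = pre ++ b :: b :: t' :=
      set_append_len pre (b :: t') a b
    have e2 : (pre ++ b :: b :: t').set (pre.length + 1) a = pre ++ b :: a :: t' := by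
      simp
    by_cases hab : a > b
    · have hstep : pvInnerStep (pre ++ a :: b :: t') (pre.length + 1) = pre ++ b :: a :: t' := by
        unfold pvInnerStep
        simp only [Nat.add_sub_cancel, h1, h2, if_pos hab, e1, e2]
      rw [hstep, if_pos hab]
      have ih := pass_eq_aux (a :: t') (pre ++ [b])
      simp only [List.length_append, List.length_cons, List.length_nil, List.append_assoc,
        List.cons_append, List.nil_append] at ih
      have harr : pre.length + 1 + 1 = pre.length + (1 + 0 + 1) := by omega
      rw [harr]
      simpa using ih
    · have hstep : pvInnerStep (pre ++ a :: b :: t') (pre.length + 1) = pre ++ a :: b :: t' := by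
        unfold pvInnerStep
        simp only [Nat.add_sub_cancel, h1, h2, if_neg hab]
      rw [hstep, if_neg hab]
      have ih := pass_eq_aux (b :: t') (pre ++ [a])
      simp only [List.length_append, List.length_cons, List.length_nil, List.append_assoc,
        List.cons_append, List.nil_append] at ih
      have harr : pre.length + 1 + 1 = pre.length + (1 + 0 + 1) := by omega
      rw [harr]
      simpa using ih
termination_by t.length

theorem pass_eq (l : List Int) :
    (List.range' 1 (l.length - 1)).foldl pvInnerStep l = bubAux l := by
  have := pass_eq_aux l []
  simpa using this

theorem bubAux_perm (l : List Int) : (bubAux l).Perm l := by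
  match l with
  | [] => simp [bubAux]
  | [a] => simp [bubAux]
  | a :: b :: t =>
    rw [bubAux_cons2]
    by_cases hab : a > b
    · rw [if_pos hab]
      exact ((bubAux_perm (a :: t)).cons b).trans (List.Perm.swap a b t)
    · rw [if_neg hab]
      exact (bubAux_perm (b :: t)).cons a
termination_by l.length

theorem bubAux_last (l : List Int) (hne : l ≠ []) :
    ∃ l' M, bubAux l = l' ++ [M] ∧ ∀ x ∈ l, x ≤ M := by
  match l with
  | [] => exact absurd rfl hne
  | [a] => exact ⟨[], a, by simp [bubAux], by simp⟩
  | a :: b :: t =>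
    rw [bubAux_cons2]
    by_cases hab : a > b
    · obtain ⟨l', M, heq, hle⟩ := bubAux_last (a :: t) (by simp)
      refine ⟨b :: l', M, by simp [if_pos hab, heq], ?_⟩
      intro x hx
      simp only [List.mem_cons] at hx
      rcases hx with rfl | rfl | hx
      · exact hle x (by simp)
      · exact le_of_lt (lt_of_lt_of_le hab (hle a (by simp)))
      · exact hle x (by simp [hx])
    · obtain ⟨l', M, heq, hle⟩ := bubAux_last (b :: t) (by simp)
      refine ⟨a :: l', M, by simp [if_neg hab, heq], ?_⟩
      intro x hx
      simp only [List.mem_cons] at hx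
      rcases hx with rfl | rfl | hx
      · exact le_trans (not_lt.mp hab) (hle b (by simp))
      · exact hle x (by simp)
      · exact hle x (by simp [hx])
termination_by l.length

theorem bubAux_append_max (l' : List Int) (M : Int) (h : ∀ x ∈ l', x ≤ M) :
    bubAux (l' ++ [M]) = bubAux l' ++ [M] := by
  match l' with
  | [] => simp [bubAux]
  | [a] =>
    have : ¬ a > M := not_lt.mpr (h a (by simp))
    simp only [List.cons_append, List.nil_append, bubAux_cons2, if_neg this]
    simp [bubAux]
  | a :: b :: t =>
    have h1 : ∀ x ∈ a :: t, x ≤ M := by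
      intro x hx
      simp only [List.mem_cons] at hx
      rcases hx with rfl | hx
      · exact h x (by simp)
      · exact h x (by simp [hx])
    have h2 : ∀ x ∈ b :: t, x ≤ M := by
      intro x hx
      simp only [List.mem_cons] at hx
      rcases hx with rfl | hx
      · exact h x (by simp)
      · exact h x (by simp [hx])
    have e1 := bubAux_append_max (a :: t) M h1
    have e2 := bubAux_append_max (b :: t) M h2
    by_cases hab : a > b
    · simp only [List.cons_append, bubAux_cons2, if_pos hab]
      simp only [List.cons_append] at e1
      rw [e1]
    · simp only [List.cons_append, bubAux_cons2, if_neg hab]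
      simp only [List.cons_append] at e2
      rw [e2]
termination_by l'.length

theorem iter_perm (k : Nat) (l : List Int) : (bubAux^[k] l).Perm l := by
  induction k generalizing l with
  | zero => simp
  | succ k ih =>
    rw [Function.iterate_succ_apply]
    exact (ih (bubAux l)).trans (bubAux_perm l)

theorem iter_append_max (k : Nat) (l' : List Int) (M : Int) (h : ∀ x ∈ l', x ≤ M) :
    bubAux^[k] (l' ++ [M]) = bubAux^[k] l' ++ [M] := by
  induction k generalizing l' with
  | zero => simp
  | succ k ih =>
    rw [Function.iterate_succ_apply, Function.iterate_succ_apply,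
      bubAux_append_max l' M h]
    exact ih (bubAux l') (fun x hx => h x ((bubAux_perm l').mem_iff.mp hx))

theorem iter_sorted (k : Nat) (l : List Int) (hlen : l.length ≤ k + 1) :
    (bubAux^[k] l).Pairwise (· ≤ ·) := by
  induction k generalizing l with
  | zero =>
    match l, hlen with
    | [], _ => simp
    | [a], _ => simp
  | succ k ih =>
    rw [Function.iterate_succ_apply]
    by_cases hsmall : l.length ≤ k + 1
    · exact ih (bubAux l) (by rw [(bubAux_perm l).length_eq]; exact hsmall)
    · have hne : l ≠ [] := by intro h; subst h; simp at hsmall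
      obtain ⟨l', M, heq, hle⟩ := bubAux_last l hne
      have hperm : (l' ++ [M]).Perm l := heq ▸ bubAux_perm l
      have hle' : ∀ x ∈ l', x ≤ M := fun x hx => hle x (hperm.mem_iff.mp (by simp [hx]))
      rw [heq, iter_append_max k l' M hle']
      have hlenl' : l'.length ≤ k + 1 := by
        have := hperm.length_eq
        simp at this
        omega
      refine List.pairwise_append.mpr ⟨ih l' hlenl', by simp, ?_⟩
      intro x hx y hy
      simp only [List.mem_singleton] at hy
      subst hy
      exact hle' x ((iter_perm k l').mem_iff.mp hx)

theorem foldl_const_iterate (r : List Nat) (f : List Int → List Int) (l : List Int) :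
    r.foldl (fun x _ => f x) l = f^[r.length] l := by
  induction r generalizing l with
  | nil => simp
  | cons a r ih => simp [ih, Function.iterate_succ_apply]

theorem sort_this_list_eq_iter (l : List Int) :
    sort_this_list l = bubAux^[l.length - 1] l := by
  unfold sort_this_list
  have : ∀ (r : List Nat),
      r.foldl (fun x _section => (List.range' 1 (x.length - 1)).foldl pvInnerStep x) l
        = bubAux^[r.length] l := by
    intro r
    rw [show (fun (x : List Int) (_section : Nat) =>
          (List.range' 1 (x.length - 1)).foldl pvInnerStep x)
        = (fun x _ => bubAux x) from funext fun x => funext fun _ => pass_eq x]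
    exact foldl_const_iterate r bubAux l
  simpa using this (List.range' 1 (l.length - 1))

-- ===== VERDICT (by name: the statement is the Claim_ definition above) =====
theorem sort_this_list_spec : Claim_equal_sort_this_list := by
  intro l _
  unfold Spec_sort_this_list sort_this_list_alt
  rw [sort_this_list_eq_iter l]
  exact (PySem.List.sorted_id_eq_of_perm_of_pairwise l (bubAux^[l.length - 1] l)
    (iter_perm (l.length - 1) l)
    (iter_sorted (l.length - 1) l (by omega))).symm
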